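-- pv_equiv track=rewrite | github.com/luohy15/daily | 2021/03/02/70-climbing-stairs/main_70_1.py | fastpow
-- ===== SOURCE A (Python) =====
-- def mult(ma, mb):
--     f = [[0,0],[0,0]]
--     for i in range(2):
--         for j in range(2):
--             f[i][j] = ma[i][0] * mb[0][j] + ma[i][1] * mb[1][j]
--     return f
--
-- def fastpow(n):
--     f = [[1, 0], [0, 1]]
--     tmpm = [[1, 1], [1, 0]]
--     while(n > 0):
--         if n % 2 == 1:
--             f = mult(f, tmpm)
--         tmpm = mult(tmpm, tmpm)
--         n = int(n / 2)
--     return f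
-- ===== SOURCE B (Python) =====
-- def _fib(k):
--     # returns (F(k), F(k+1)) by fast doubling
--     if k <= 0:
--         return (0, 1)
--     a, b = _fib(k >> 1)
--     c = a * (2 * b - a)
--     d = a * a + b * b
--     if k & 1:
--         return (d, c + d)
--     return (c, d)
--
-- def fastpow(n):
--     if n <= 0:
--         return [[1, 0], [0, 1]]
--     a, b = _fib(n)
--     return [[b, a], [a, b - a]]
-- ===== Notes on version B (the rewrite author's own statement) =====
-- stated objective: faster
-- what changed: Replaces iterative 2x2 matrix fast exponentiation with a recursive scalar fast-doubling computation of (F(n),F(n+1)), reconstructing the matrix from the pair.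
import Mathlib
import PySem

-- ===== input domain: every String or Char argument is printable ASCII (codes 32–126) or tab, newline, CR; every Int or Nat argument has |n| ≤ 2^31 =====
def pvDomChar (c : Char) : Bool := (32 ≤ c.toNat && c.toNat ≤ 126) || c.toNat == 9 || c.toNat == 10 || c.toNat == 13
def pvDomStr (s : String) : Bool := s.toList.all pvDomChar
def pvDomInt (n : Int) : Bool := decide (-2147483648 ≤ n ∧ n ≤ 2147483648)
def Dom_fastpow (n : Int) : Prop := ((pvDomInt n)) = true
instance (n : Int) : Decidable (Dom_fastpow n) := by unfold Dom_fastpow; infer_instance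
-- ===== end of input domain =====

-- B replaces A's iterative 2x2-matrix fast exponentiation by recursive scalar fast doubling
-- of the pair (F(n), F(n+1)); objective: faster (fewer big-int multiplications per halving step).

-- ===== PORT A =====
-- plain in-range list indexing (the Python code only indexes the 2x2 literals it builds, exact here)
def mget (m : List (List Int)) (i j : Nat) : Int := (m.getD i []).getD j 0

-- the double 'for i in range(2): for j in range(2):' loop filling f entrywise
def mult (ma mb : List (List Int)) : List (List Int) :=
  (List.range 2).map (fun i => (List.range 2).map (fun j =>
    mget ma i 0 * mget mb 0 j + mget ma i 1 * mget mb 1 j))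

-- the while loop; Python's 'n = int(n / 2)' truncates toward zero, which for the n > 0
-- reached here equals floor division (and float division is exact on Dom, |n| ≤ 2^31)
def fastpowLoop (f tmpm : List (List Int)) (n : Int) : List (List Int) :=
  if _h : 0 < n then
    fastpowLoop (if PySem.Int.mod n 2 == 1 then mult f tmpm else f)
      (mult tmpm tmpm) (PySem.Int.floordiv n 2)
  else f
termination_by n.toNat
decreasing_by
  rw [PySem.Int.floordiv_eq_ediv_of_pos (by omega)]
  omega

def fastpow (n : Int) : List (List Int) := fastpowLoop [[1, 0], [0, 1]] [[1, 1], [1, 0]] n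

-- ===== PORT B =====
-- fast-doubling helper: _fib(k) = (F(k), F(k+1)); 'k >> 1' is floor division by 2
def fibPair (k : Int) : Int × Int :=
  if _h : k ≤ 0 then (0, 1)
  else
    let p := fibPair (PySem.Int.floordiv k 2)
    let a := p.1
    let b := p.2
    let c := a * (2 * b - a)
    let d := a * a + b * b
    if PySem.Int.band k 1 == 1 then (d, c + d) else (c, d)
termination_by k.toNat
decreasing_by
  rw [PySem.Int.floordiv_eq_ediv_of_pos (by omega)]
  omega

def fastpow_alt (n : Int) : List (List Int) :=
  if n ≤ 0 then [[1, 0], [0, 1]]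
  else
    let p := fibPair n
    [[p.2, p.1], [p.1, p.2 - p.1]]

-- ===== PRECONDITION & SPEC =====
def Spec_fastpow (n : Int) (out : List (List Int)) : Prop := out = fastpow_alt n
instance (n : Int) (out : List (List Int)) : Decidable (Spec_fastpow n out) := by unfold Spec_fastpow; infer_instance

-- ===== CLAIM (what is proved, stated in full; the proofs are below) =====
def Claim_equal_fastpow : Prop := ∀ (n : Int), Dom_fastpow n → Spec_fastpow n (fastpow n)

-- ===== LEMMAS AND PROOFS =====

-- Fibonacci over Int, and the Fibonacci power matrix P k = [[F(k+1), F k], [F k, F(k-1)]]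
-- (the bottom-right entry written as F(k+1) - F k so that P 0 is the identity matrix)
def FI (k : Nat) : Int := (Nat.fib k : Int)

def P (k : Nat) : List (List Int) := [[FI (k + 1), FI k], [FI k, FI (k + 1) - FI k]]

theorem FI_add_two (k : Nat) : FI (k + 2) = FI (k + 1) + FI k := by
  simp only [FI]
  rw [Nat.fib_add_two]
  push_cast
  ring

theorem FI_addm (a b : Nat) : FI (a + b + 1) = FI a * FI b + FI (a + 1) * FI (b + 1) := by
  simp only [FI]
  rw [Nat.fib_add]
  push_cast
  ring

-- the four entry identities of P a * P b = P (a + b)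
theorem entry1 (a b : Nat) : FI (a + 1) * FI (b + 1) + FI a * FI b = FI (a + b + 1) := by
  rw [FI_addm]; ring

theorem entry3 (a b : Nat) : FI a * FI (b + 1) + (FI (a + 1) - FI a) * FI b = FI (a + b) := by
  cases a with
  | zero => simp [FI]
  | succ a' =>
    have h := FI_addm a' b
    have hr := FI_add_two a'
    have : a' + 1 + b = a' + b + 1 := by omega
    rw [this, h, hr]; ring

theorem entry2 (a b : Nat) : FI (a + 1) * FI b + FI a * (FI (b + 1) - FI b) = FI (a + b) := by
  have := entry3 a b
  linarith [this, mul_comm (FI a) (FI (b + 1))]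

theorem entry4 (a b : Nat) :
    FI a * FI b + (FI (a + 1) - FI a) * (FI (b + 1) - FI b) = FI (a + b + 1) - FI (a + b) := by
  cases a with
  | zero => simp [FI]
  | succ a' =>
    have h3 := entry3 a' b
    have hr := FI_add_two a'
    have hab : a' + 1 + b + 1 = a' + b + 2 := by omega
    have hab2 : a' + 1 + b = a' + b + 1 := by omega
    rw [hab, hab2, FI_add_two (a' + b), hr]
    linarith [h3]

theorem mult_eval (a b c d e f g h : Int) :
    mult [[a, b], [c, d]] [[e, f], [g, h]] =
      [[a * e + b * g, a * f + b * h], [c * e + d * g, c * f + d * h]] := by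
  rfl

theorem mult_P (a b : Nat) : mult (P a) (P b) = P (a + b) := by
  simp only [P, mult_eval]
  rw [entry1, entry2, entry3, entry4]

theorem P_zero : P 0 = [[1, 0], [0, 1]] := by decide
theorem P_one : P 1 = [[1, 1], [1, 0]] := by decide

-- loop invariant for A: starting from accumulators P a, P b the loop returns P (a + b * n.toNat)
theorem loop_P (m : Nat) : ∀ (n : Int), n.toNat = m → ∀ (a b : Nat),
    fastpowLoop (P a) (P b) n = P (a + b * n.toNat) := by
  induction m using Nat.strong_induction_on with
  | _ m ih =>
    intro n hm a b
    unfold fastpowLoop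
    by_cases hpos : 0 < n
    · rw [dif_pos hpos]
      have hdiv : PySem.Int.floordiv n 2 = ((n.toNat / 2 : Nat) : Int) := by
        rw [PySem.Int.floordiv_eq_ediv_of_pos (by omega)]; omega
      have hmod : PySem.Int.mod n 2 = ((n.toNat % 2 : Nat) : Int) := by
        rw [PySem.Int.mod_eq_emod_of_pos (by omega)]; omega
      have hlt : (PySem.Int.floordiv n 2).toNat < m := by rw [hdiv]; omega
      have htn : (PySem.Int.floordiv n 2).toNat = n.toNat / 2 := by rw [hdiv]; omega
      simp only [mult_P]
      by_cases hodd : n.toNat % 2 = 1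
      · have hb : (PySem.Int.mod n 2 == 1) = true := by rw [hmod, hodd]; rfl
        rw [hb, if_pos rfl, ih _ hlt _ rfl, htn,
          show a + b + (b + b) * (n.toNat / 2) = a + b * n.toNat by
            have ht : n.toNat = 2 * (n.toNat / 2) + 1 := by omega
            generalize hgen : n.toNat / 2 = t at ht ⊢
            rw [ht]
            ring]
      · have hb : (PySem.Int.mod n 2 == 1) = false := by
          rw [hmod, show n.toNat % 2 = 0 by omega]; rfl
        rw [hb]
        simp only [Bool.false_eq_true, if_false]
        rw [ih _ hlt _ rfl, htn,
          show a + (b + b) * (n.toNat / 2) = a + b * n.toNat by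
            have ht : n.toNat = 2 * (n.toNat / 2) := by omega
            generalize hgen : n.toNat / 2 = t at ht ⊢
            rw [ht]
            ring]
    · rw [dif_neg hpos]
      rw [show n.toNat = 0 by omega, Nat.mul_zero, Nat.add_zero]

theorem fastpow_eq_P (n : Int) : fastpow n = P n.toNat := by
  have := loop_P n.toNat n rfl 0 1
  rw [fastpow, ← P_zero, ← P_one, this]
  congr 1
  omega

-- fast-doubling correctness: fibPair k = (F(toNat k), F(toNat k + 1))
theorem fibPair_eq (m : Nat) : ∀ (k : Int), k.toNat = m →
    fibPair k = (FI k.toNat, FI (k.toNat + 1)) := by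
  induction m using Nat.strong_induction_on with
  | _ m ih =>
    intro k hm
    unfold fibPair
    by_cases hle : k ≤ 0
    · rw [dif_pos hle, show k.toNat = 0 by omega]
      simp [FI]
    · rw [dif_neg hle]
      have hpos : 0 < k := by omega
      have hdiv : PySem.Int.floordiv k 2 = ((k.toNat / 2 : Nat) : Int) := by
        rw [PySem.Int.floordiv_eq_ediv_of_pos (by omega)]; omega
      have hlt : (PySem.Int.floordiv k 2).toNat < m := by rw [hdiv]; omega
      have htn : (PySem.Int.floordiv k 2).toNat = k.toNat / 2 := by rw [hdiv]; omega
      rw [ih _ hlt _ rfl, htn]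
      set q := k.toNat / 2 with hq
      have hband : PySem.Int.band k 1 = ((k.toNat % 2 : Nat) : Int) := by
        rw [show k = ((k.toNat : Nat) : Int) by omega,
          show (1 : Int) = ((1 : Nat) : Int) from rfl, PySem.Int.band_natCast]
        rw [Nat.and_one_is_mod]
        simp
      have hdbl : FI q * (2 * FI (q + 1) - FI q) = FI (q + q) := by
        have := entry3 q q
        linarith
      have hdbl1 : FI q * FI q + FI (q + 1) * FI (q + 1) = FI (q + q + 1) := by
        have := FI_addm q q
        linarith
      have hstep : FI (q + q + 2) = FI (q + q + 1) + FI (q + q) := FI_add_two (q + q)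
      by_cases hodd : k.toNat % 2 = 1
      · have hb : (PySem.Int.band k 1 == 1) = true := by rw [hband, hodd]; rfl
        rw [hb, if_pos rfl, show k.toNat = q + q + 1 by omega]
        simp only [Prod.mk.injEq]
        exact ⟨by linarith, by rw [show q + q + 1 + 1 = q + q + 2 from rfl]; linarith⟩
      · have hb : (PySem.Int.band k 1 == 1) = false := by
          rw [hband, show k.toNat % 2 = 0 by omega]; rfl
        rw [hb]
        simp only [Bool.false_eq_true, if_false]
        rw [show k.toNat = q + q by omega]
        simp only [Prod.mk.injEq]
        exact ⟨by linarith, by linarith⟩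

theorem fastpow_alt_eq_P (n : Int) : fastpow_alt n = P n.toNat := by
  rw [fastpow_alt]
  by_cases hle : n ≤ 0
  · have : n.toNat = 0 := by omega
    simp [hle, this, P_zero]
  · simp only [hle, if_false]
    rw [fibPair_eq n.toNat n rfl]
    rfl

-- ===== VERDICT (by name: the statement is the Claim_ definition above) =====
theorem fastpow_spec : Claim_equal_fastpow := by
  intro n _
  unfold Spec_fastpow
  rw [fastpow_eq_P, fastpow_alt_eq_P]
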